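-- pv_equiv track=rewrite | github.com/yldrimftih/ADS-B | RSTestGenerator.py | build_identification_msg
-- ===== SOURCE A (Python) =====
-- def crc24(data_bytes):
--     POLY = 0x1FFF409
--     crc = 0
--     for byte in data_bytes:
--         crc ^= byte << 16
--         for _ in range(8):
--             crc <<= 1
--             if crc & 0x1000000:
--                 crc ^= POLY
--     return crc & 0xFFFFFF
--
-- def build_frame_with_crc(df, ca, icao_int, me_56bits):
--     header_88 = ((df & 0x1F) << 83
--                | (ca & 0x07) << 80
--                | (icao_int & 0xFFFFFF) << 56
--                | (me_56bits & 0xFFFFFFFFFFFFFF))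
--     data_bytes = header_88.to_bytes(11, 'big')
--     pi = crc24(data_bytes)
--     frame = data_bytes + pi.to_bytes(3, 'big')
--     return frame.hex().upper()
--
-- CALLSIGN_CHARSET = " ABCDEFGHIJKLMNOPQRSTUVWXYZ                     0123456789      "
--
-- def build_identification_msg(icao_hex, callsign):
--     icao_int = int(icao_hex, 16)
--     cs = callsign.upper().ljust(8)[:8]
--     tc, cat = 4, 0
--     char_bits = 0
--     for ch in cs:
--         idx = CALLSIGN_CHARSET.find(ch)
--         if idx < 0: idx = 0
--         char_bits = (char_bits << 6) | (idx & 0x3F)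
--     me = ((tc & 0x1F) << 51) | ((cat & 0x07) << 48) | (char_bits & 0xFFFFFFFFFFFF)
--     return build_frame_with_crc(17, 5, icao_int, me)
-- ===== SOURCE B (Python) =====
-- # B: table-driven CRC-24, direct byte assembly of the frame (DF17/CA5 first byte = 0x8D,
-- # TC4/CAT0 ME byte = 0x20), and direct uppercase hex formatting.
--
-- POLY = 0x1FFF409
--
-- def _crc_entry(i):
--     r = i << 16
--     for _ in range(8):
--         r <<= 1
--         if r & 0x1000000:
--             r ^= POLY
--     return r & 0xFFFFFF
--
-- CRC_TABLE = [_crc_entry(i) for i in range(256)]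
--
-- CALLSIGN_CHARSET = " ABCDEFGHIJKLMNOPQRSTUVWXYZ                     0123456789      "
--
-- def crc24(data_bytes):
--     crc = 0
--     for b in data_bytes:
--         crc = ((crc << 8) ^ CRC_TABLE[((crc >> 16) ^ b) & 0xFF]) & 0xFFFFFF
--     return crc
--
-- def build_identification_msg(icao_hex, callsign):
--     icao = int(icao_hex, 16) & 0xFFFFFF
--     cs = callsign.upper().ljust(8)[:8]
--     bits = 0
--     for ch in cs:
--         idx = CALLSIGN_CHARSET.find(ch)
--         if idx < 0:
--             idx = 0
--         bits = (bits << 6) | (idx & 0x3F)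
--     frame = bytes([0x8D]) + icao.to_bytes(3, 'big') + bytes([0x20]) + bits.to_bytes(6, 'big')
--     frame += crc24(frame).to_bytes(3, 'big')
--     return ''.join('%02X' % b for b in frame)
-- ===== Notes on version B (the rewrite author's own statement) =====
-- stated objective: alternative
-- what changed: crc24 is replaced by a 256-entry table-driven CRC (one lookup per byte instead of the 8-step shift/XOR inner loop), the 11 frame bytes are assembled directly as a byte list (0x8D, 3 ICAO bytes, 0x20, 6 callsign-bits bytes) instead of packing an 88-bit integer and slicing it with to_bytes, and the hex output is formatted directly in uppercase instead of hex().upper().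
import Mathlib
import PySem

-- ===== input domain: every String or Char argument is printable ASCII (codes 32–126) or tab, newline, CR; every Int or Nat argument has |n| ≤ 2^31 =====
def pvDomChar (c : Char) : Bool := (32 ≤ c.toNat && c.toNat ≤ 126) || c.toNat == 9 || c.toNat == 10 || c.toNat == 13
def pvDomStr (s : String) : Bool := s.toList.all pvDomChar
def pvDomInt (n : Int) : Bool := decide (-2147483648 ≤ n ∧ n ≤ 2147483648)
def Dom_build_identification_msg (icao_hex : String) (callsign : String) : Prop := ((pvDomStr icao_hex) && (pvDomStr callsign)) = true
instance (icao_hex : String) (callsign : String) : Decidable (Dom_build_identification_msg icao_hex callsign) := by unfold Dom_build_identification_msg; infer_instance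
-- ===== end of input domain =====

-- B rewrites A with a 256-entry table-driven CRC-24, direct assembly of the 11 frame bytes
-- (instead of packing an 88-bit integer), and direct uppercase hex formatting (objective: alternative).

-- ===== PORT A =====

def pvCharset : List Char := " ABCDEFGHIJKLMNOPQRSTUVWXYZ                     0123456789      ".toList

-- crc24: Python ints here are always nonnegative (crc < 2^25 throughout), so Nat is exact
def pvCrc24 (data : List Nat) : Nat :=
  (data.foldl (fun crc byte =>
      (List.range 8).foldl
        (fun c _ =>
          let c := c <<< 1
          if c &&& 0x1000000 ≠ 0 then c ^^^ 0x1FFF409 else c)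
        (crc ^^^ (byte <<< 16))) 0) &&& 0xFFFFFF

-- hand port of x.to_bytes(n, 'big'): exact for 0 ≤ x < 2^(8n), which holds at every call site
def pvToBytesBE (n : Nat) (x : Nat) : List Nat :=
  (List.range n).map (fun i => (x >>> (8 * (n - 1 - i))) &&& 0xFF)

-- hand port of bytes.hex(): exact, every element is a byte value < 256 at the call sites
def pvHexLowerDigit (n : Nat) : Char :=
  ['0','1','2','3','4','5','6','7','8','9','a','b','c','d','e','f'].getD n ' '
def pvBytesHexLower (bs : List Nat) : List Char :=
  bs.flatMap (fun b => [pvHexLowerDigit (b >>> 4), pvHexLowerDigit (b &&& 0xF)])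

-- the callsign-encoding loop of A (Source B contains the identical loop, so both ports share it);
-- char_bits stays a nonnegative int, and idx ≥ 0 after the `if`, so Nat/.toNat are exact
def pvCsBits (cs : List Char) : Nat :=
  cs.foldl (fun bits ch =>
    let idx : Int := PySem.Chars.find pvCharset [ch]
    let idx : Int := if idx < 0 then 0 else idx
    (bits <<< 6) ||| (idx.toNat &&& 0x3F)) 0

def pvBuildFrameWithCrc (df ca icao_int me : Int) : String :=
  let header : Int :=
    PySem.Int.bor
      (PySem.Int.bor
        (PySem.Int.bor ((PySem.Int.band df 0x1F) <<< (83 : Nat)) ((PySem.Int.band ca 0x07) <<< (80 : Nat)))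
        ((PySem.Int.band icao_int 0xFFFFFF) <<< (56 : Nat)))
      (PySem.Int.band me 0xFFFFFFFFFFFFFF)
  let dataBytes := pvToBytesBE 11 header.toNat   -- header is masked nonnegative, < 2^88: to_bytes(11) is exact
  let pi := pvCrc24 dataBytes
  let frame := dataBytes ++ pvToBytesBE 3 pi
  PySem.Str.upper (String.ofList (pvBytesHexLower frame))

def build_identification_msg (icao_hex : String) (callsign : String) : String :=
  let icao_int : Int := (PySem.Int.ofStrBase? icao_hex 16).getD 0  -- ValueError excluded by Pre_, .getD 0 never hit
  let up := (PySem.Str.upper callsign).toList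
  let cs : List Char := (up ++ List.replicate (8 - up.length) ' ').take 8  -- .ljust(8)[:8]
  let char_bits := pvCsBits cs
  let me : Int :=
    PySem.Int.bor
      (PySem.Int.bor ((PySem.Int.band 4 0x1F) <<< (51 : Nat)) ((PySem.Int.band 0 0x07) <<< (48 : Nat)))
      (PySem.Int.band (char_bits : Int) 0xFFFFFFFFFFFF)
  pvBuildFrameWithCrc 17 5 icao_int me

-- ===== PORT B =====

-- CRC_TABLE entry: the 8-iteration shift/XOR loop run on (i << 16)
def pvCrcEntry (i : Nat) : Nat :=
  ((List.range 8).foldl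
    (fun r _ =>
      let r := r <<< 1
      if r &&& 0x1000000 ≠ 0 then r ^^^ 0x1FFF409 else r)
    (i <<< 16)) &&& 0xFFFFFF

def pvCrcTable : List Nat := (List.range 256).map pvCrcEntry

-- table-driven crc24; the index is &-ed with 0xFF, so the list access is always in range (getD exact)
def pvCrc24T (data : List Nat) : Nat :=
  data.foldl (fun crc b =>
    ((crc <<< 8) ^^^ pvCrcTable.getD (((crc >>> 16) ^^^ b) &&& 0xFF) 0) &&& 0xFFFFFF) 0

-- '%02X' % b: exact for b < 256, which holds for every frame byte
def pvHexUpperDigit (n : Nat) : Char :=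
  ['0','1','2','3','4','5','6','7','8','9','A','B','C','D','E','F'].getD n ' '
def pvByteHexUpper (b : Nat) : List Char := [pvHexUpperDigit (b >>> 4), pvHexUpperDigit (b &&& 0xF)]

def build_identification_msg_alt (icao_hex : String) (callsign : String) : String :=
  let icao : Nat := (PySem.Int.band ((PySem.Int.ofStrBase? icao_hex 16).getD 0) 0xFFFFFF).toNat  -- & 0xFFFFFF ≥ 0
  let up := (PySem.Str.upper callsign).toList
  let cs : List Char := (up ++ List.replicate (8 - up.length) ' ').take 8  -- .ljust(8)[:8]
  let bits := pvCsBits cs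
  let frame : List Nat := 0x8D :: (pvToBytesBE 3 icao ++ 0x20 :: pvToBytesBE 6 bits)
  let frame := frame ++ pvToBytesBE 3 (pvCrc24T frame)
  String.ofList (frame.flatMap pvByteHexUpper)

-- ===== PRECONDITION & SPEC =====
-- Pre_ excludes exactly the inputs on which int(icao_hex, 16) raises ValueError in A (B raises there too).
def Pre_build_identification_msg (icao_hex : String) (callsign : String) : Prop :=
  (PySem.Int.ofStrBase? icao_hex 16).isSome = true
instance (icao_hex : String) (callsign : String) : Decidable (Pre_build_identification_msg icao_hex callsign) := by
  unfold Pre_build_identification_msg; infer_instance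

def pvWitness_build_identification_msg : String × String := ("ABC123", "Test12")

def Spec_build_identification_msg (icao_hex : String) (callsign : String) (out : String) : Prop :=
  out = build_identification_msg_alt icao_hex callsign
instance (icao_hex : String) (callsign : String) (out : String) : Decidable (Spec_build_identification_msg icao_hex callsign out) := by
  unfold Spec_build_identification_msg; infer_instance

-- ===== CLAIM (what is proved, stated in full; the proofs are below) =====
def Claim_equal_build_identification_msg : Prop := ∀ (icao_hex : String) (callsign : String), Dom_build_identification_msg icao_hex callsign → Pre_build_identification_msg icao_hex callsign → Spec_build_identification_msg icao_hex callsign (build_identification_msg icao_hex callsign)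

-- ===== LEMMAS AND PROOFS =====

-- the one CRC shift/XOR iteration, and k of them
def pvStep (c : Nat) : Nat :=
  if (c <<< 1) &&& 0x1000000 ≠ 0 then (c <<< 1) ^^^ 0x1FFF409 else (c <<< 1)

def pvStepN : Nat → Nat → Nat
  | 0, x => x
  | k + 1, x => pvStepN k (pvStep x)

lemma pvInner_eq (x : Nat) :
    (List.range 8).foldl
      (fun c _ =>
        let c := c <<< 1
        if c &&& 0x1000000 ≠ 0 then c ^^^ 0x1FFF409 else c) x = pvStepN 8 x := rfl

lemma pvMaskId {n : Nat} (a : Nat) (h : a < 2 ^ n) : a &&& (2 ^ n - 1) = a := by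
  rw [Nat.and_two_pow_sub_one_eq_mod, Nat.mod_eq_of_lt h]

lemma pvShlXor (a b k : Nat) : (a ^^^ b) <<< k = (a <<< k) ^^^ (b <<< k) := by
  apply Nat.eq_of_testBit_eq; intro j
  simp [Nat.testBit_shiftLeft, Nat.testBit_xor, Bool.and_xor_distrib_left]

lemma pvStepXor (x y : Nat) (hy : y < 2 ^ 23) : pvStep (x ^^^ y) = pvStep x ^^^ (y <<< 1) := by
  have hy24 : y <<< 1 < 2 ^ 24 := by rw [Nat.shiftLeft_eq]; omega
  have hy1 : (y <<< 1) &&& 0x1000000 = 0 := by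
    rw [show (0x1000000 : Nat) = 2 ^ 24 from rfl, Nat.and_two_pow,
        Nat.testBit_eq_false_of_lt hy24]
    rfl
  have hcond : ((x <<< 1) ^^^ (y <<< 1)) &&& 0x1000000 = (x <<< 1) &&& 0x1000000 := by
    rw [Nat.and_xor_distrib_right, hy1, Nat.xor_zero]
  unfold pvStep
  rw [pvShlXor, hcond]
  split_ifs with h
  · rw [Nat.xor_assoc, Nat.xor_assoc, Nat.xor_comm (y <<< 1)]
  · rfl

lemma pvStepLt {c : Nat} (hc : c < 2 ^ 24) : pvStep c < 2 ^ 24 := by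
  have h25 : c <<< 1 < 2 ^ 25 := by rw [Nat.shiftLeft_eq]; omega
  unfold pvStep
  rw [show (0x1000000 : Nat) = 2 ^ 24 from rfl, Nat.and_two_pow]
  split_ifs with h
  · have ht : (c <<< 1).testBit 24 = true := by
      cases hb : (c <<< 1).testBit 24 <;> simp [hb] at h ⊢
    apply Nat.lt_pow_two_of_testBit
    intro i hi
    rcases eq_or_lt_of_le hi with h24 | hgt
    · rw [Nat.testBit_xor, ← h24, ht]
      decide
    · rw [Nat.testBit_xor,
          Nat.testBit_eq_false_of_lt (lt_of_lt_of_le h25 (Nat.pow_le_pow_right (by norm_num) hgt)),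
          Nat.testBit_eq_false_of_lt (lt_of_lt_of_le (by norm_num) (Nat.pow_le_pow_right (by norm_num) hgt))]
      rfl
  · have hf : (c <<< 1).testBit 24 = false := by
      cases hb : (c <<< 1).testBit 24 <;> simp [hb] at h ⊢
    apply Nat.lt_pow_two_of_testBit
    intro i hi
    rcases eq_or_lt_of_le hi with h24 | hgt
    · rw [← h24]; exact hf
    · exact Nat.testBit_eq_false_of_lt (lt_of_lt_of_le h25 (Nat.pow_le_pow_right (by norm_num) hgt))

lemma pvStepNLt : ∀ (k : Nat) {c : Nat}, c < 2 ^ 24 → pvStepN k c < 2 ^ 24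
  | 0, _, hc => hc
  | k + 1, _, hc => pvStepNLt k (pvStepLt hc)

lemma pvStepNXor : ∀ (k : Nat) (x y : Nat), y * 2 ^ k < 2 ^ 24 →
    pvStepN k (x ^^^ y) = pvStepN k x ^^^ (y <<< k) := by
  intro k
  induction k with
  | zero => intro x y _; simp [pvStepN]
  | succ k ih =>
    intro x y hy
    have h2 : 2 ≤ 2 ^ (k + 1) := by
      have h : (2:Nat) ^ 1 ≤ 2 ^ (k + 1) := Nat.pow_le_pow_right (by norm_num) (by omega)
      simpa using h
    have hy23 : y < 2 ^ 23 := by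
      have hmul : y * 2 ≤ y * 2 ^ (k + 1) := Nat.mul_le_mul_left y h2
      omega
    have hyk : (y <<< 1) * 2 ^ k < 2 ^ 24 := by
      rw [Nat.shiftLeft_eq]
      calc y * 2 ^ 1 * 2 ^ k = y * 2 ^ (k + 1) := by rw [pow_succ]; ring
      _ < 2 ^ 24 := hy
    show pvStepN k (pvStep (x ^^^ y)) = pvStepN k (pvStep x) ^^^ y <<< (k + 1)
    rw [pvStepXor x y hy23, ih (pvStep x) (y <<< 1) hyk, ← Nat.shiftLeft_add,
        Nat.add_comm 1 k]

lemma pvDec (c b : Nat) :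
    c ^^^ (b <<< 16) = (((c >>> 16) ^^^ b) <<< 16) ^^^ (c &&& 0xFFFF) := by
  apply Nat.eq_of_testBit_eq; intro j
  simp only [Nat.testBit_xor, Nat.testBit_shiftLeft, Nat.testBit_shiftRight, Nat.testBit_and,
    show (0xFFFF : Nat) = 2 ^ 16 - 1 from rfl, Nat.testBit_two_pow_sub_one, ge_iff_le]
  by_cases hj : 16 ≤ j
  · have hjj : 16 + (j - 16) = j := by omega
    simp only [hj, decide_true, Bool.true_and, hjj, show ¬ j < 16 by omega, decide_false,
      Bool.and_false, Bool.xor_false]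
  · simp only [hj, decide_false, Bool.false_and, Bool.xor_false, Bool.false_xor,
      show j < 16 by omega, decide_true, Bool.and_true]

lemma pvShl8Mask (c : Nat) : (c <<< 8) &&& 0xFFFFFF = (c &&& 0xFFFF) <<< 8 := by
  apply Nat.eq_of_testBit_eq; intro j
  simp only [Nat.testBit_and, Nat.testBit_shiftLeft,
    show (0xFFFFFF : Nat) = 2 ^ 24 - 1 from rfl, show (0xFFFF : Nat) = 2 ^ 16 - 1 from rfl,
    Nat.testBit_two_pow_sub_one, ge_iff_le]
  by_cases hj : 8 ≤ j
  · simp only [hj, decide_true, Bool.true_and,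
      show (j < 24) = (j - 8 < 16) by simp; omega]
  · simp only [hj, decide_false, Bool.false_and]

lemma pvTable_getD {h : Nat} (hh : h < 256) : pvCrcTable.getD h 0 = pvCrcEntry h := by
  unfold pvCrcTable
  rw [List.getD_eq_getElem?_getD, List.getElem?_map, List.getElem?_range hh]
  rfl

lemma pvPerByte (c b : Nat) (hc : c < 2 ^ 24) (hb : b < 256) :
    pvStepN 8 (c ^^^ (b <<< 16)) =
      ((c <<< 8) ^^^ pvCrcTable.getD (((c >>> 16) ^^^ b) &&& 0xFF) 0) &&& 0xFFFFFF := by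
  have hhi : c >>> 16 < 256 := by rw [Nat.shiftRight_eq_div_pow]; omega
  have hh : (c >>> 16) ^^^ b < 256 := Nat.xor_lt_two_pow (n := 8) hhi hb
  have hidx : ((c >>> 16) ^^^ b) &&& 0xFF = (c >>> 16) ^^^ b := pvMaskId (n := 8) _ hh
  have hT : pvStepN 8 ((((c >>> 16) ^^^ b)) <<< 16) < 2 ^ 24 := by
    apply pvStepNLt; rw [Nat.shiftLeft_eq]; omega
  have hTable : pvCrcTable.getD (((c >>> 16) ^^^ b) &&& 0xFF) 0 =
      pvStepN 8 ((((c >>> 16) ^^^ b)) <<< 16) := by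
    rw [hidx, pvTable_getD hh]
    unfold pvCrcEntry
    rw [pvInner_eq]
    exact pvMaskId (n := 24) _ hT
  have hlo : (c &&& 0xFFFF) * 2 ^ 8 < 2 ^ 24 := by
    have : c &&& 0xFFFF ≤ 0xFFFF := Nat.and_le_right
    omega
  rw [hTable, pvDec c b, pvStepNXor 8 _ _ hlo, Nat.and_xor_distrib_right, pvShl8Mask,
      show pvStepN 8 (((c >>> 16) ^^^ b) <<< 16) &&& 16777215 = pvStepN 8 (((c >>> 16) ^^^ b) <<< 16) from pvMaskId (n := 24) _ hT,
      Nat.xor_comm]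

lemma pvCrcFold : ∀ (data : List Nat) (c : Nat), c < 2 ^ 24 → (∀ b ∈ data, b < 256) →
    data.foldl (fun crc byte =>
      (List.range 8).foldl
        (fun c _ =>
          let c := c <<< 1
          if c &&& 0x1000000 ≠ 0 then c ^^^ 0x1FFF409 else c)
        (crc ^^^ (byte <<< 16))) c =
    data.foldl (fun crc b =>
      ((crc <<< 8) ^^^ pvCrcTable.getD (((crc >>> 16) ^^^ b) &&& 0xFF) 0) &&& 0xFFFFFF) c := by
  intro data
  induction data with
  | nil => intro c _ _; rfl
  | cons b t ih =>
    intro c hc hball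
    have hb : b < 256 := hball b (List.mem_cons_self ..)
    have hstep : (List.range 8).foldl
        (fun c _ =>
          let c := c <<< 1
          if c &&& 0x1000000 ≠ 0 then c ^^^ 0x1FFF409 else c)
        (c ^^^ (b <<< 16)) =
        ((c <<< 8) ^^^ pvCrcTable.getD (((c >>> 16) ^^^ b) &&& 0xFF) 0) &&& 0xFFFFFF := by
      rw [pvInner_eq]; exact pvPerByte c b hc hb
    simp only [List.foldl_cons, hstep]
    apply ih
    · have : ((c <<< 8) ^^^ pvCrcTable.getD (((c >>> 16) ^^^ b) &&& 0xFF) 0) &&& 0xFFFFFF ≤ 0xFFFFFF :=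
        Nat.and_le_right
      omega
    · exact fun x hx => hball x (List.mem_cons_of_mem _ hx)

lemma pvCrcTLt : ∀ (data : List Nat) (c : Nat), c < 2 ^ 24 →
    data.foldl (fun crc b =>
      ((crc <<< 8) ^^^ pvCrcTable.getD (((crc >>> 16) ^^^ b) &&& 0xFF) 0) &&& 0xFFFFFF) c < 2 ^ 24 := by
  intro data
  induction data with
  | nil => exact fun c hc => hc
  | cons b t ih =>
    intro c hc
    simp only [List.foldl_cons]
    apply ih
    have : ((c <<< 8) ^^^ pvCrcTable.getD (((c >>> 16) ^^^ b) &&& 0xFF) 0) &&& 0xFFFFFF ≤ 0xFFFFFF :=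
      Nat.and_le_right
    omega

lemma pvCrc_eq (data : List Nat) (hb : ∀ b ∈ data, b < 256) : pvCrc24 data = pvCrc24T data := by
  unfold pvCrc24 pvCrc24T
  rw [pvCrcFold data 0 (by norm_num) hb]
  exact pvMaskId (n := 24) _ (pvCrcTLt data 0 (by norm_num))

lemma pvBytes11 (x : Nat) : pvToBytesBE 11 x =
    [(x >>> 80) &&& 0xFF, (x >>> 72) &&& 0xFF, (x >>> 64) &&& 0xFF, (x >>> 56) &&& 0xFF,
     (x >>> 48) &&& 0xFF, (x >>> 40) &&& 0xFF, (x >>> 32) &&& 0xFF, (x >>> 24) &&& 0xFF,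
     (x >>> 16) &&& 0xFF, (x >>> 8) &&& 0xFF, (x >>> 0) &&& 0xFF] := rfl

lemma pvBytes3 (x : Nat) : pvToBytesBE 3 x =
    [(x >>> 16) &&& 0xFF, (x >>> 8) &&& 0xFF, (x >>> 0) &&& 0xFF] := rfl

lemma pvBytes6 (x : Nat) : pvToBytesBE 6 x =
    [(x >>> 40) &&& 0xFF, (x >>> 32) &&& 0xFF, (x >>> 24) &&& 0xFF,
     (x >>> 16) &&& 0xFF, (x >>> 8) &&& 0xFF, (x >>> 0) &&& 0xFF] := rfl

set_option maxRecDepth 16384 in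
lemma pvBytesEq (m cb : Nat) (hm : m < 2 ^ 24) (hcb : cb < 2 ^ 48) :
    pvToBytesBE 11 (17 <<< 83 ||| 5 <<< 80 ||| m <<< 56 ||| (4 <<< 51 ||| cb)) =
      0x8D :: (pvToBytesBE 3 m ++ 0x20 :: pvToBytesBE 6 cb) := by
  have hm' : ∀ t, 24 ≤ t → m.testBit t = false := fun t ht =>
    Nat.testBit_eq_false_of_lt (lt_of_lt_of_le hm (Nat.pow_le_pow_right (by norm_num) ht))
  have hcb' : ∀ t, 48 ≤ t → cb.testBit t = false := fun t ht =>
    Nat.testBit_eq_false_of_lt (lt_of_lt_of_le hcb (Nat.pow_le_pow_right (by norm_num) ht))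
  rw [pvBytes11, pvBytes3, pvBytes6]
  simp only [List.cons_append, List.nil_append, List.cons.injEq]
  refine ⟨?_, ?_, ?_, ?_, ?_, ?_, ?_, ?_, ?_, ?_, ?_, trivial⟩ <;>
    (apply Nat.eq_of_testBit_eq
     intro j
     rcases Nat.lt_or_ge j 8 with hj | hj
     · interval_cases j <;>
         (simp only [Nat.testBit_and, Nat.testBit_or, Nat.testBit_shiftLeft, Nat.testBit_shiftRight,
            show (255 : Nat) = 2 ^ 8 - 1 from rfl, Nat.testBit_two_pow_sub_one, ge_iff_le]
          simp [hm', hcb', Nat.testBit_eq_false_of_lt]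
          try decide)
     · have hj' : ¬ j < 8 := by omega
       simp only [Nat.testBit_and, show (255 : Nat) = 2 ^ 8 - 1 from rfl,
         Nat.testBit_two_pow_sub_one, hj', decide_false, Bool.and_false]
       try rw [Nat.testBit_eq_false_of_lt (lt_of_lt_of_le (by norm_num)
         (Nat.pow_le_pow_right (by norm_num) (by omega : 8 ≤ j)))])

lemma pvToBytesBE_lt (n x : Nat) : ∀ b ∈ pvToBytesBE n x, b < 256 := by
  intro b hb
  simp only [pvToBytesBE, List.mem_map] at hb
  obtain ⟨i, _, rfl⟩ := hb
  have : (x >>> (8 * (n - 1 - i))) &&& 0xFF ≤ 0xFF := Nat.and_le_right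
  omega

lemma pvCsBitsAux : ∀ (cs : List Char) (acc p : Nat), acc < 2 ^ p →
    cs.foldl (fun bits ch =>
      let idx : Int := PySem.Chars.find pvCharset [ch]
      let idx : Int := if idx < 0 then 0 else idx
      (bits <<< 6) ||| (idx.toNat &&& 0x3F)) acc < 2 ^ (p + 6 * cs.length) := by
  intro cs
  induction cs with
  | nil => intro acc p h; simpa using h
  | cons ch t ih =>
    intro acc p h
    simp only [List.foldl_cons, List.length_cons]
    have hstep : (acc <<< 6) |||
        ((if PySem.Chars.find pvCharset [ch] < 0 then (0 : Int)
          else PySem.Chars.find pvCharset [ch]).toNat &&& 0x3F) < 2 ^ (p + 6) := by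
      apply Nat.or_lt_two_pow
      · rw [Nat.shiftLeft_eq, pow_add]
        exact (Nat.mul_lt_mul_right (by norm_num)).mpr h
      · exact lt_of_le_of_lt Nat.and_le_right
          (lt_of_lt_of_le (by norm_num : (0x3F : Nat) < 2 ^ 6)
            (Nat.pow_le_pow_right (by norm_num) (by omega : 6 ≤ p + 6)))
    refine lt_of_lt_of_le (ih _ (p + 6) hstep) (Nat.pow_le_pow_right (by norm_num) (by omega))

lemma pvCsBitsLt (cs : List Char) (h : cs.length ≤ 8) : pvCsBits cs < 2 ^ 48 :=
  lt_of_lt_of_le (pvCsBitsAux cs 0 0 (by norm_num))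
    (Nat.pow_le_pow_right (by norm_num) (by omega))

lemma pvBandMask (a : Int) :
    0 ≤ PySem.Int.band a 0xFFFFFF ∧ (PySem.Int.band a 0xFFFFFF).toNat < 2 ^ 24 := by
  by_cases ha : 0 ≤ a
  · rw [PySem.Int.band_of_nonneg ha (by norm_num)]
    have h16 : ((0xFFFFFF : Int)).toNat = 16777215 := rfl
    refine ⟨Int.natCast_nonneg _, ?_⟩
    rw [Int.toNat_natCast, h16]
    have : a.toNat &&& 16777215 ≤ 16777215 := Nat.and_le_right
    omega
  · have hmask : (0 : Int) ≤ 0xFFFFFF := by norm_num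
    unfold PySem.Int.band
    rw [if_neg ha, if_pos hmask]
    have h16 : ((0xFFFFFF : Int)).toNat = 16777215 := rfl
    refine ⟨Int.natCast_nonneg _, ?_⟩
    rw [Int.toNat_natCast, h16]
    omega

lemma pvNibble (n : Nat) (h : n < 16) :
    PySem.Chars.upperChar (pvHexLowerDigit n) = pvHexUpperDigit n := by
  interval_cases n <;> decide

lemma pvHexEq : ∀ (l : List Nat), (∀ b ∈ l, b < 256) →
    PySem.Chars.upper (pvBytesHexLower l) = l.flatMap pvByteHexUpper := by
  intro l
  induction l with
  | nil => intro _; rfl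
  | cons b t ih =>
    intro h
    have hb : b < 256 := h b (List.mem_cons_self ..)
    have h4 : b >>> 4 < 16 := by rw [Nat.shiftRight_eq_div_pow]; omega
    have hF : b &&& 0xF < 16 := by
      have : b &&& 0xF ≤ 0xF := Nat.and_le_right
      omega
    have hexp : pvBytesHexLower (b :: t) =
        pvHexLowerDigit (b >>> 4) :: pvHexLowerDigit (b &&& 0xF) :: pvBytesHexLower t := rfl
    rw [hexp]
    simp only [PySem.Chars.upper, List.map_cons, List.flatMap_cons, pvByteHexUpper,
      List.cons_append, List.nil_append, List.cons.injEq]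
    rw [pvNibble _ h4, pvNibble _ hF]
    refine ⟨rfl, rfl, ?_⟩
    have := ih (fun x hx => h x (List.mem_cons_of_mem _ hx))
    simpa [PySem.Chars.upper] using this

lemma pvUpperOfList (l : List Char) :
    PySem.Str.upper (String.ofList l) = String.ofList (PySem.Chars.upper l) := by
  have h := PySem.Str.toList_upper (String.ofList l)
  rw [String.toList_ofList] at h
  rw [← h, String.ofList_toList]

-- ===== VERDICT (by name: the statement is the Claim_ definition above) =====
theorem build_identification_msg_spec : Claim_equal_build_identification_msg := by
  intro icao_hex callsign _ hpre
  obtain ⟨v, hv⟩ := Option.isSome_iff_exists.mp hpre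
  unfold Spec_build_identification_msg
  simp only [build_identification_msg, build_identification_msg_alt, pvBuildFrameWithCrc, hv,
    Option.getD_some]
  set up := (PySem.Str.upper callsign).toList with hup
  set cs := (up ++ List.replicate (8 - up.length) ' ').take 8 with hcs
  set cb := pvCsBits cs with hcb
  have hcs8 : cs.length ≤ 8 := by rw [hcs]; exact List.length_take_le ..
  have hcb48 : cb < 2 ^ 48 := pvCsBitsLt cs hcs8
  obtain ⟨hbnn, hblt⟩ := pvBandMask v
  set m := (PySem.Int.band v 0xFFFFFF).toNat with hm
  have hicao : PySem.Int.band v 0xFFFFFF = (m : Int) := (Int.toNat_of_nonneg hbnn).symm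
  have hcbm : PySem.Int.band (cb : Int) 0xFFFFFFFFFFFF = ((cb : Nat) : Int) := by
    rw [show (0xFFFFFFFFFFFF : Int) = ((0xFFFFFFFFFFFF : Nat) : Int) from rfl,
        PySem.Int.band_natCast, show (0xFFFFFFFFFFFF : Nat) = 2 ^ 48 - 1 from rfl,
        pvMaskId cb hcb48]
  have hme : PySem.Int.bor
      (PySem.Int.bor ((PySem.Int.band 4 0x1F) <<< (51 : Nat)) ((PySem.Int.band 0 0x07) <<< (48 : Nat)))
      (PySem.Int.band (cb : Int) 0xFFFFFFFFFFFF) = (((4 <<< 51 ||| cb : Nat)) : Int) := by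
    rw [hcbm, show PySem.Int.bor ((PySem.Int.band 4 0x1F) <<< (51 : Nat))
          ((PySem.Int.band 0 0x07) <<< (48 : Nat)) = (((4 <<< 51 : Nat)) : Int) from by decide,
        PySem.Int.bor_natCast]
  have hmenat : (4 <<< 51 ||| cb : Nat) < 2 ^ 56 :=
    Nat.or_lt_two_pow (by rw [Nat.shiftLeft_eq]; norm_num) (lt_trans hcb48 (by norm_num))
  have hmemask : PySem.Int.band (((4 <<< 51 ||| cb : Nat)) : Int) 0xFFFFFFFFFFFFFF =
      (((4 <<< 51 ||| cb : Nat)) : Int) := by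
    rw [show (0xFFFFFFFFFFFFFF : Int) = ((0xFFFFFFFFFFFFFF : Nat) : Int) from rfl,
        PySem.Int.band_natCast, show (0xFFFFFFFFFFFFFF : Nat) = 2 ^ 56 - 1 from rfl,
        pvMaskId _ hmenat]
  rw [hme, hicao, hmemask,
      show PySem.Int.bor ((PySem.Int.band 17 0x1F) <<< (83 : Nat))
        ((PySem.Int.band 5 0x07) <<< (80 : Nat)) = (((17 <<< 83 ||| 5 <<< 80 : Nat)) : Int) from by decide,
      show ((m : Int)) <<< (56 : Nat) = (((m <<< 56 : Nat)) : Int) from rfl,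
      PySem.Int.bor_natCast, PySem.Int.bor_natCast, Int.toNat_natCast,
      pvBytesEq m cb hblt hcb48]
  set fr := (0x8D : Nat) :: (pvToBytesBE 3 m ++ 0x20 :: pvToBytesBE 6 cb) with hfr
  have hfrb : ∀ b ∈ fr, b < 256 := by
    intro b hb
    rw [hfr] at hb
    rcases List.mem_cons.mp hb with rfl | hb'
    · norm_num
    rcases List.mem_append.mp hb' with h1 | h2
    · exact pvToBytesBE_lt _ _ b h1
    rcases List.mem_cons.mp h2 with rfl | h3
    · norm_num
    · exact pvToBytesBE_lt _ _ b h3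
  rw [pvCrc_eq fr hfrb]
  have hall : ∀ b ∈ fr ++ pvToBytesBE 3 (pvCrc24T fr), b < 256 := by
    intro b hb
    rcases List.mem_append.mp hb with h1 | h2
    · exact hfrb b h1
    · exact pvToBytesBE_lt _ _ b h2
  rw [pvUpperOfList, pvHexEq _ hall]
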